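-- pv_equiv track=rewrite | github.com/cyndyishida/Algos | Assorted/emails.py | solution
-- ===== SOURCE A (Python) =====
-- def solution(L):
--     # write your code in Python 3.6
--     # hash table problem, basically create a frequency table
--     # run time is O( N * M )
--     # N = len(L)
--     # M = len(local part of email )
--     e_freq = {}
--
--     for email in L:
--         sep = email.index('@')
--         stop = email.index('+') if '+' in email[0:sep] else sep
--
--         local = ''.join(i for i in email[0:stop] if i != '.')
--         domain = email[sep:]
--
--         e_freq[local+domain] = e_freq.get(local+domain, 0 ) + 1
--
--
--     return sum(1 for i in e_freq.values() if i > 1)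
-- ===== SOURCE B (Python) =====
-- def _norm(email):
--     sep = email.index('@')
--     local = email[:sep]
--     if '+' in local:
--         local = local[:local.index('+')]
--     return local.replace('.', '') + email[sep:]
--
--
-- def solution(L):
--     # sort the normalized keys, then scan runs of equal adjacent keys:
--     # a key is counted iff its run is longer than 1
--     ks = sorted(_norm(e) for e in L)
--     dup = 0
--     i = 0
--     n = len(ks)
--     while i < n:
--         j = i + 1
--         while j < n and ks[j] == ks[i]:
--             j += 1
--         if j - i > 1:
--             dup += 1
--         i = j
--     return dup
-- ===== Notes on version B (the rewrite author's own statement) =====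
-- stated objective: alternative
-- what changed: Replaces the frequency dict and its final value-threshold pass by a sort-then-scan algorithm: normalized keys are sorted and runs of equal adjacent keys are scanned, counting runs of length greater than one; normalization is restructured to truncate and clean the local part as a string instead of A's character-generator join.
import Mathlib
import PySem

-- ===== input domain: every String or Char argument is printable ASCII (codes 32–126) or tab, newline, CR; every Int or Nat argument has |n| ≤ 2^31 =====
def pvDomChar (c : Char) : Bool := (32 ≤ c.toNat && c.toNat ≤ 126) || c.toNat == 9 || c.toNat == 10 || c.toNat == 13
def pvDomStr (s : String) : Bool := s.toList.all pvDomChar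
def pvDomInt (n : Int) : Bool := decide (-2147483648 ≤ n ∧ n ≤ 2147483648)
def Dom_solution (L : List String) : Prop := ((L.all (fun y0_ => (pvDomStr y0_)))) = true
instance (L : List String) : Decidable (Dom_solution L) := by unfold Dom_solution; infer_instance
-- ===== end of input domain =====

-- B replaces A's frequency dict + final value-threshold pass by sort-then-scan:
-- sort the normalized keys and count runs of equal adjacent keys longer than 1.

-- ===== PORT A =====
-- A's per-email normalization: str.index of the single characters '@'/'+' is ported as
-- PySem.List.index? on the char list (exact: first occurrence); "'+' in email[0:sep]" is
-- char membership in the prefix (exact for a one-character needle). Pre_solution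
-- guarantees '@' is present, so the .getD 0 default of index? (Python: ValueError)
-- is never reached inside Pre_.
def normKeyA (email : String) : String :=
  let cs := email.toList
  let sep := (PySem.List.index? cs '@').getD 0
  let stop := if (cs.take sep).contains '+' then (PySem.List.index? cs '+').getD 0 else sep
  String.mk ((cs.take stop).filter (fun c => c != '.') ++ cs.drop sep)

def solution (L : List String) : Int :=
  let d : PySem.Dict String Int :=
    L.foldl (fun d email =>
      let k := normKeyA email
      d.insert k (d.getD k 0 + 1)) PySem.Dict.empty
  (PySem.Dict.values d).foldl (fun acc i => if 1 < i then acc + 1 else acc) 0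

-- ===== PORT B =====
-- B's normalization helper _norm: truncate the local slice at its first '+', then
-- local.replace('.', '') — a one-char pattern with empty replacement, ported as the
-- filter removing '.' (exact).
def normKeyB (email : String) : String :=
  let cs := email.toList
  let sep := (PySem.List.index? cs '@').getD 0
  let local0 := cs.take sep
  let local1 := if local0.contains '+' then local0.take ((PySem.List.index? local0 '+').getD 0) else local0
  String.mk (local1.filter (fun c => c != '.') ++ cs.drop sep)

-- B's outer while loop: each step consumes one run of equal adjacent keys
-- (the inner while j < n and ks[j] == ks[i]) and counts it if longer than 1.
def runScan : List String → Int
  | [] => 0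
  | x :: xs =>
    let run := xs.takeWhile (fun y => y == x)
    let rest := xs.dropWhile (fun y => y == x)
    (if 1 < run.length + 1 then 1 else 0) + runScan rest
termination_by l => l.length
decreasing_by
  simp only [List.length_cons]
  have := List.length_dropWhile_le (fun y => y == x) xs
  omega

def solution_alt (L : List String) : Int :=
  runScan (PySem.List.sorted (L.map normKeyB) (fun x => x) false)

-- ===== PRECONDITION & SPEC =====
-- Pre_: every email contains '@' — exactly where Python A returns instead of raising
-- ValueError from email.index('@').
def Pre_solution (L : List String) : Prop := ∀ e ∈ L, '@' ∈ e.toList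
instance (L : List String) : Decidable (Pre_solution L) := by unfold Pre_solution; infer_instance
def pvWitness_solution : List String := ["a.b@x.com", "ab+c@x.com", "ab@y.com"]
def Spec_solution (L : List String) (out : Int) : Prop := out = solution_alt L
instance (L : List String) (out : Int) : Decidable (Spec_solution L out) := by unfold Spec_solution; infer_instance

-- ===== CLAIM (what is proved, stated in full; the proofs are below) =====
def Claim_equal_solution : Prop := ∀ (L : List String), Dom_solution L → Pre_solution L → Spec_solution L (solution L)

-- ===== LEMMAS AND PROOFS =====

-- the two normalizations agree on every email (with or without '@')
theorem normKey_eq (email : String) : normKeyA email = normKeyB email := by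
  unfold normKeyA normKeyB
  by_cases hmem : '+' ∈ email.toList.take ((PySem.List.index? email.toList '@').getD 0)
  · have hcontains : (email.toList.take ((PySem.List.index? email.toList '@').getD 0)).contains '+' = true := by
      simpa using hmem
    have hsome : (PySem.List.index? (email.toList.take ((PySem.List.index? email.toList '@').getD 0)) '+').isSome = true :=
      (PySem.List.index?_isSome_iff _ _).mpr hmem
    obtain ⟨k, hk⟩ := Option.isSome_iff_exists.mp hsome
    have hsplit : email.toList
        = email.toList.take ((PySem.List.index? email.toList '@').getD 0)
          ++ email.toList.drop ((PySem.List.index? email.toList '@').getD 0) :=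
      (List.take_append_drop _ _).symm
    have hidx : PySem.List.index? email.toList '+' = some k := by
      conv_lhs => rw [hsplit]
      rw [PySem.List.index?_append_of_mem _ hmem, hk]
    obtain ⟨hklt, -, -⟩ := PySem.List.getElem_of_index?_eq_some hk
    have hkle : k ≤ (PySem.List.index? email.toList '@').getD 0 := by
      have := List.length_take_le ((PySem.List.index? email.toList '@').getD 0) email.toList
      omega
    simp only [hcontains, if_true, hidx, hk, Option.getD_some, List.take_take]
    rw [Nat.min_eq_left hkle]
  · have hcontains : (email.toList.take ((PySem.List.index? email.toList '@').getD 0)).contains '+' = false := by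
      simpa using hmem
    simp only [hcontains, Bool.false_eq_true, if_false]

theorem keys_eq (L : List String) : L.map normKeyA = L.map normKeyB := by
  simp [normKey_eq]

-- A's result: the number of distinct keys occurring at least twice in ks = L.map normKeyA
theorem solution_eq_countP (L : List String) :
    solution L = ((PySem.Set.ofList (L.map normKeyA)).countP
      (fun k => decide (2 ≤ (L.map normKeyA).count k)) : Int) := by
  unfold solution
  show (PySem.Dict.values (L.foldl
      (fun d email => PySem.Dict.insert d (normKeyA email) (PySem.Dict.getD d (normKeyA email) 0 + 1))
      PySem.Dict.empty)).foldl (fun acc i => if 1 < i then acc + 1 else acc) 0 = _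
  rw [← List.foldl_map (f := normKeyA)
    (g := fun d k => PySem.Dict.insert d k (PySem.Dict.getD d k 0 + 1))]
  rw [PySem.Dict.foldl_insert_getD_add_one_eq_counter]
  rw [PySem.List.foldl_ite_add_one (p := fun i : Int => 1 < i)]
  have hv : PySem.Dict.values (PySem.Dict.counter (L.map normKeyA))
      = (PySem.Set.ofList (L.map normKeyA)).map (fun k => (((L.map normKeyA).count k : Int))) := by
    simp [PySem.Dict.values, PySem.Dict.items_counter, List.map_map, Function.comp]
  rw [hv]
  rw [List.countP_map]
  have : ((PySem.Set.ofList (L.map normKeyA)).countP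
        ((fun i : Int => decide (1 < i)) ∘ fun k => (((L.map normKeyA).count k : Int))))
      = ((PySem.Set.ofList (L.map normKeyA)).countP
        (fun k => decide (2 ≤ (L.map normKeyA).count k))) := by
    apply List.countP_congr
    intro k _
    simp only [Function.comp]
    constructor <;> intro h <;> simp_all <;> omega
  rw [this]
  simp

-- countP agrees on any two duplicate-free lists with the same members
theorem countP_nodup_ext (p : String → Bool) (l1 l2 : List String)
    (h1 : l1.Nodup) (h2 : l2.Nodup) (hm : ∀ k, k ∈ l1 ↔ k ∈ l2) :
    l1.countP p = l2.countP p :=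
  ((List.perm_ext_iff_of_nodup h1 h2).mpr hm).countP_eq p

-- on a ≤-sorted list, runScan counts the distinct elements occurring at least twice
theorem runScan_sorted : ∀ (n : Nat) (l : List String), l.length ≤ n →
    l.Pairwise (· ≤ ·) →
    runScan l = ((PySem.Set.ofList l).countP (fun k => decide (2 ≤ l.count k)) : Int) := by
  intro n
  induction n with
  | zero =>
    intro l hl _
    have : l = [] := List.eq_nil_of_length_eq_zero (Nat.le_zero.mp hl)
    subst this
    simp [runScan, PySem.Set.ofList]
  | succ n ih =>
    intro l hl hp
    cases l with
    | nil => simp [runScan, PySem.Set.ofList]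
    | cons x xs =>
      rw [runScan]
      set run := xs.takeWhile (fun y => y == x) with hrun
      set rest := xs.dropWhile (fun y => y == x) with hrest
      have hxs : run ++ rest = xs := List.takeWhile_append_dropWhile
      have hrun_all : ∀ y ∈ run, y = x := by
        intro y hy
        have := List.mem_takeWhile_imp hy
        simpa using this
      have hp_xs : ∀ y ∈ xs, x ≤ y := (List.pairwise_cons.mp hp).1
      have hp_rest : rest.Pairwise (· ≤ ·) :=
        List.Pairwise.sublist ((List.dropWhile_sublist _).cons _) hp
      -- x does not occur in rest
      have hx_rest : x ∉ rest := by
        intro hx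
        cases hr : rest with
        | nil => rw [hr] at hx; simp at hx
        | cons h t =>
          have hdw : xs.dropWhile (fun y => y == x) = h :: t := by rw [← hrest]; exact hr
          have hne0 : xs.dropWhile (fun y => y == x) ≠ [] := by simp [hdw]
          have h0 : ((xs.dropWhile (fun y => y == x)).head hne0 == x) = false :=
            List.head_dropWhile_not _ hne0
          simp only [hdw, List.head_cons] at h0
          have hne : h ≠ x := by simpa using h0
          have hxh : x ≤ h := hp_xs h (by
            rw [← hxs, hr]; exact List.mem_append_right _ (by simp))
          rw [hr] at hx
          rcases List.mem_cons.mp hx with he | ht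
          · exact hne he.symm
          · have hhx : h ≤ x := by
              rw [hr] at hp_rest
              exact (List.pairwise_cons.mp hp_rest).1 x ht
            exact hne (le_antisymm hhx hxh)
      have hcount_x : (x :: xs).count x = run.length + 1 := by
        rw [← hxs]
        simp only [List.count_cons, List.count_append]
        have h1 : run.count x = run.length :=
          List.count_eq_length.mpr (fun b hb => (hrun_all b hb).symm)
        have h2 : rest.count x = 0 := List.count_eq_zero.mpr hx_rest
        simp [h1, h2]
      have hcount_rest : ∀ k ∈ rest, (x :: xs).count k = rest.count k := by
        intro k hk
        have hkx : k ≠ x := fun e => hx_rest (e ▸ hk)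
        rw [← hxs]
        simp only [List.count_cons, List.count_append]
        have h1 : run.count k = 0 := List.count_eq_zero.mpr (fun hkr => hkx (hrun_all k hkr))
        simp [h1, Ne.symm hkx]
      have hlen : rest.length ≤ n := by
        have h1 : rest.length ≤ xs.length := List.length_dropWhile_le _ _
        simp at hl; omega
      rw [ih rest hlen hp_rest]
      -- replace the countP over Set.ofList (x::xs) by one over x :: Set.ofList rest
      have hmemxs : ∀ k, k ∈ (x :: xs) ↔ k = x ∨ k ∈ rest := by
        intro k
        rw [← hxs]
        simp only [List.mem_cons, List.mem_append]
        constructor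
        · rintro (he | hr | hr)
          · exact Or.inl he
          · exact Or.inl (hrun_all k hr)
          · exact Or.inr hr
        · rintro (he | hr)
          · exact Or.inl he
          · exact Or.inr (Or.inr hr)
      have hnodup2 : (x :: PySem.Set.ofList rest).Nodup := by
        refine List.nodup_cons.mpr ⟨?_, PySem.Set.nodup_ofList _⟩
        intro hx
        exact hx_rest ((PySem.Set.mem_ofList _ _).mp hx)
      have hct : (PySem.Set.ofList (x :: xs)).countP (fun k => decide (2 ≤ (x :: xs).count k))
          = (x :: PySem.Set.ofList rest).countP (fun k => decide (2 ≤ (x :: xs).count k)) := by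
        apply countP_nodup_ext _ _ _ (PySem.Set.nodup_ofList _) hnodup2
        intro k
        rw [PySem.Set.mem_ofList]
        rw [hmemxs k]
        simp [PySem.Set.mem_ofList]
      rw [hct]
      rw [List.countP_cons]
      have hcrest : (PySem.Set.ofList rest).countP (fun k => decide (2 ≤ (x :: xs).count k))
          = (PySem.Set.ofList rest).countP (fun k => decide (2 ≤ rest.count k)) := by
        apply List.countP_congr
        intro k hk
        rw [hcount_rest k ((PySem.Set.mem_ofList _ _).mp hk)]
      rw [hcrest]
      rw [hcount_x]
      by_cases h2 : 1 ≤ run.length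
      · have : (2 ≤ run.length + 1) = True := by simp; omega
        simp only [this, decide_true]
        rw [if_pos (by omega : 1 < run.length + 1)]
        push_cast
        ring
      · have hr0 : run.length = 0 := by omega
        simp [hr0]

-- ===== VERDICT (by name: the statement is the Claim_ definition above) =====
theorem solution_spec : Claim_equal_solution := by
  intro L _ _
  unfold Spec_solution solution_alt
  rw [solution_eq_countP L, keys_eq L]
  set ks := L.map normKeyB with hks
  set s := PySem.List.sorted ks (fun x => x) false with hs
  have hperm : s.Perm ks := PySem.List.sorted_perm _ _ _
  have hpair : s.Pairwise (· ≤ ·) := by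
    have := PySem.List.sorted_pairwise (xs := ks) (key := fun x => x)
    simpa using this
  rw [runScan_sorted s.length s le_rfl hpair]
  congr 1
  have h1 : (PySem.Set.ofList s).countP (fun k => decide (2 ≤ s.count k))
      = (PySem.Set.ofList s).countP (fun k => decide (2 ≤ ks.count k)) := by
    apply List.countP_congr
    intro k _
    rw [hperm.count_eq]
  rw [h1]
  apply countP_nodup_ext _ _ _ (PySem.Set.nodup_ofList _) (PySem.Set.nodup_ofList _)
  intro k
  rw [PySem.Set.mem_ofList, PySem.Set.mem_ofList, hperm.mem_iff]
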